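-- pv_equiv track=rewrite | github.com/iansedano/aoc | python/2024/09.py | write_summarized_disk
-- ===== SOURCE A (Python) =====
-- def write_summarized_disk(disk_map):
--     summarized_disk = []
--     file_id = 0
--     blank = False
--
--     for n in disk_map:
--         if not blank:
--             summarized_disk.append((file_id, n))
--         else:
--             summarized_disk.append((None, n))
--
--         if not blank:
--             file_id += 1
--         blank = not blank
--     return summarized_disk
-- ===== SOURCE B (Python) =====
-- def write_summarized_disk(disk_map):
--     # Stage 1: chunk the map into (file_len, blank_len) pairs (last chunk may be lone).
--     pairs = [disk_map[i:i + 2] for i in range(0, len(disk_map), 2)]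
--     # Stage 2: one file id per chunk; a blank entry only when the chunk is full.
--     out = []
--     for file_id, pair in enumerate(pairs):
--         out.append((file_id, pair[0]))
--         if len(pair) == 2:
--             out.append((None, pair[1]))
--     return out
-- ===== Notes on version B (the rewrite author's own statement) =====
-- stated objective: alternative
-- what changed: Replaces A's single pass with a mutable file_id counter and blank toggle by a two-stage decomposition: first chunk the disk map into 2-element slices, then emit one (file_id, file_len) per chunk plus a (None, blank_len) when the chunk is full.
import Mathlib
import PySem

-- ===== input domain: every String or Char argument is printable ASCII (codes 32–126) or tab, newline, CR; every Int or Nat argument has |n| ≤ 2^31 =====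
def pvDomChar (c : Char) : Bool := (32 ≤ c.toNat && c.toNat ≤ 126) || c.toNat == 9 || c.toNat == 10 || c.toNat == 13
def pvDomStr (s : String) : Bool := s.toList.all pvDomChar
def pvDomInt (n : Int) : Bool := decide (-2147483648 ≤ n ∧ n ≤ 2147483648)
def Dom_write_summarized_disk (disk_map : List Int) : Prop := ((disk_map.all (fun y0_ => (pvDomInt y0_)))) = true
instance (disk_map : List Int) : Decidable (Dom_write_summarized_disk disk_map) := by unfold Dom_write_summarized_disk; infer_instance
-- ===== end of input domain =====

-- B replaces A's single pass with a mutable counter and toggle by a two-stage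
-- decomposition: chunk into 2-element slices, then emit per chunk (alternative; same cost).

-- ===== PORT A =====
-- state: (summarized_disk, file_id, blank); one step of A's for-loop body
def wsdStepA (st : List (Option Int × Int) × Int × Bool) (n : Int) :
    List (Option Int × Int) × Int × Bool :=
  let (summarized_disk, file_id, blank) := st
  let summarized_disk :=
    if !blank then summarized_disk ++ [(some file_id, n)]
    else summarized_disk ++ [(none, n)]
  let file_id := if !blank then file_id + 1 else file_id
  (summarized_disk, file_id, !blank)

def write_summarized_disk (disk_map : List Int) : List (Option Int × Int) :=
  (disk_map.foldl wsdStepA ([], 0, false)).1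

-- ===== PORT B =====
-- one iteration of B's enumerate loop over the chunk list
-- (pair[0]/pair[1] are ported with pyGetD; every chunk is nonempty, so the
-- default is never read and Python never raises here)
def wsdStepB (out : List (Option Int × Int)) (p : Int × List Int) :
    List (Option Int × Int) :=
  let out := out ++ [(some p.1, PySem.List.pyGetD p.2 0 0)]
  if p.2.length = 2 then out ++ [(none, PySem.List.pyGetD p.2 1 0)] else out

def write_summarized_disk_alt (disk_map : List Int) : List (Option Int × Int) :=
  let pairs := (PySem.List.pyRange 0 disk_map.length 2).map
    (fun i => PySem.List.slice disk_map (some i) (some (i + 2)))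
  (PySem.List.enumerate pairs 0).foldl wsdStepB []

-- ===== PRECONDITION & SPEC =====
def Spec_write_summarized_disk (disk_map : List Int) (out : List (Option Int × Int)) : Prop := out = write_summarized_disk_alt disk_map
instance (disk_map : List Int) (out : List (Option Int × Int)) : Decidable (Spec_write_summarized_disk disk_map out) := by unfold Spec_write_summarized_disk; infer_instance

-- ===== CLAIM (what is proved, stated in full; the proofs are below) =====
def Claim_equal_write_summarized_disk : Prop := ∀ (disk_map : List Int), Dom_write_summarized_disk disk_map → Spec_write_summarized_disk disk_map (write_summarized_disk disk_map)

-- ===== LEMMAS AND PROOFS =====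

-- common reference form: the summarized disk, two elements at a time
def wsdPairs : List Int → Int → List (Option Int × Int)
  | [], _ => []
  | [n], fid => [(some fid, n)]
  | n :: b :: rest, fid => (some fid, n) :: (none, b) :: wsdPairs rest (fid + 1)

-- the chunk list B builds, as structural recursion
def chunk2 : List Int → List (List Int)
  | [] => []
  | [n] => [[n]]
  | n :: b :: rest => [n, b] :: chunk2 rest

-- A's loop, written as structural recursion producing only the appended part
def wsdGen : List Int → Int → Bool → List (Option Int × Int)
  | [], _, _ => []
  | n :: rest, fid, blank =>
      (if blank then none else some fid, n) ::
        wsdGen rest (if blank then fid else fid + 1) (!blank)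

lemma foldl_wsdStepA (xs : List Int) (acc : List (Option Int × Int)) (fid : Int) (blank : Bool) :
    (xs.foldl wsdStepA (acc, fid, blank)).1 = acc ++ wsdGen xs fid blank := by
  induction xs generalizing acc fid blank with
  | nil => simp [wsdGen]
  | cons n rest ih =>
    cases blank <;> simp [List.foldl, wsdStepA, wsdGen, ih]

lemma wsdGen_eq_pairs (xs : List Int) (fid : Int) :
    wsdGen xs fid false = wsdPairs xs fid := by
  induction xs using chunk2.induct generalizing fid with
  | case1 => simp [wsdGen, wsdPairs]
  | case2 n => simp [wsdGen, wsdPairs]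
  | case3 n b rest ih => simp [wsdGen, wsdPairs, ih]

lemma range_map_slice_eq_chunk2 (xs : List Int) :
    (List.range ((xs.length + 1) / 2)).map
      (fun k => (xs.drop (2 * k)).take 2) = chunk2 xs := by
  induction xs using chunk2.induct with
  | case1 => simp [chunk2]
  | case2 n => simp [chunk2]
  | case3 n b rest ih =>
    have hlen : (((n :: b :: rest).length + 1) / 2) = ((rest.length + 1) / 2) + 1 := by
      simp; omega
    rw [hlen, List.range_succ_eq_map, List.map_cons, List.map_map]
    simp only [chunk2]
    congr 1

-- B's chunk list equals chunk2
lemma pairs_eq_chunk2 (xs : List Int) :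
    (PySem.List.pyRange 0 xs.length 2).map
      (fun i => PySem.List.slice xs (some i) (some (i + 2))) = chunk2 xs := by
  rw [PySem.List.pyRange_of_pos 0 (xs.length : Int) (by norm_num)]
  rw [← range_map_slice_eq_chunk2]
  by_cases h : (0 : Int) < xs.length
  · rw [if_pos h]
    have hn : ((xs.length : Int) - 0 + 2 - 1) / 2 = ((xs.length + 1) / 2 : Nat) := by
      omega
    rw [hn, Int.toNat_natCast, List.map_map]
    apply List.map_congr_left
    intro k _
    have : (0 : Int) + 2 * (k : Int) = ((2 * k : Nat) : Int) := by push_cast; ring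
    simp only [Function.comp, this]
    exact PySem.List.slice_natCast_add xs (2 * k) 2
  · rw [if_neg h]
    have : xs = [] := by
      cases xs with
      | nil => rfl
      | cons a t => exfalso; apply h; simp
    simp [this]

-- B's enumerate-foldl over chunk2 produces wsdPairs
lemma foldl_wsdStepB (xs : List Int) (fid : Int) (acc : List (Option Int × Int)) :
    (PySem.List.enumerate (chunk2 xs) fid).foldl wsdStepB acc = acc ++ wsdPairs xs fid := by
  induction xs using chunk2.induct generalizing fid acc with
  | case1 => simp [chunk2, wsdPairs, PySem.List.enumerate_nil]
  | case2 n =>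
    simp [chunk2, wsdPairs, PySem.List.enumerate_cons, PySem.List.enumerate_nil,
      wsdStepB, PySem.List.pyGetD]
  | case3 n b rest ih =>
    simp [chunk2, wsdPairs, PySem.List.enumerate_cons, wsdStepB, PySem.List.pyGetD, ih]

-- ===== VERDICT (by name: the statement is the Claim_ definition above) =====
theorem write_summarized_disk_spec : Claim_equal_write_summarized_disk := by
  intro disk_map _
  unfold Spec_write_summarized_disk write_summarized_disk write_summarized_disk_alt
  rw [foldl_wsdStepA, wsdGen_eq_pairs]
  rw [show ((disk_map.length : Int)) = ((disk_map.length : Nat) : Int) from rfl]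
  rw [pairs_eq_chunk2, foldl_wsdStepB]
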